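-- pv_equiv track=rewrite | github.com/Chesszyh/tongji-course-scheduler | backend/utils/bckndSql.py | _calculateFreePeriods
-- ===== SOURCE A (Python) =====
-- def _calculateFreePeriods(occupied_times, start_time, end_time):
--     """
--     Calculate free periods based on occupied times
--     """
--     # 创建完整的时间段列表
--     all_periods = list(range(start_time, end_time + 1))
--
--     # 移除被占用的时间段
--     free_periods_list = [
--         period for period in all_periods if period not in occupied_times
--     ]
--
--     if not free_periods_list:
--         return []
--
--     # 合并连续的时间段
--     free_periods = []
--     current_start = free_periods_list[0]
--     current_end = free_periods_list[0]
--
--     for i in range(1, len(free_periods_list)):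
--         if free_periods_list[i] == current_end + 1:
--             current_end = free_periods_list[i]
--         else:
--             free_periods.append(
--                 {
--                     "start": current_start,
--                     "end": current_end,
--                     "duration": current_end - current_start + 1,
--                 }
--             )
--             current_start = free_periods_list[i]
--             current_end = free_periods_list[i]
--
--     # 添加最后一个时间段
--     free_periods.append(
--         {
--             "start": current_start,
--             "end": current_end,
--             "duration": current_end - current_start + 1,
--         }
--     )
--
--     return free_periods
-- ===== SOURCE B (Python) =====
-- def _calculateFreePeriods(occupied_times, start_time, end_time):
--     """Single pass over the range with an optional open-run start; no filtered
--     intermediate list and no separate merge step; set membership instead of list scans."""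
--     occupied = set(occupied_times)
--     free_periods = []
--     run_start = None
--     for p in range(start_time, end_time + 1):
--         if p in occupied:
--             if run_start is not None:
--                 free_periods.append({"start": run_start, "end": p - 1,
--                                      "duration": p - run_start})
--                 run_start = None
--         elif run_start is None:
--             run_start = p
--     if run_start is not None:
--         free_periods.append({"start": run_start, "end": end_time,
--                              "duration": end_time - run_start + 1})
--     return free_periods
-- ===== Notes on version B (the rewrite author's own statement) =====
-- stated objective: alternative
-- what changed: B replaces A's two-phase filter-the-range-then-merge-consecutive approach by a single pass over the range that tracks an optional open-run start and closes intervals at occupied points, using a set for membership instead of A's per-element list scan.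
import Mathlib
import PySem

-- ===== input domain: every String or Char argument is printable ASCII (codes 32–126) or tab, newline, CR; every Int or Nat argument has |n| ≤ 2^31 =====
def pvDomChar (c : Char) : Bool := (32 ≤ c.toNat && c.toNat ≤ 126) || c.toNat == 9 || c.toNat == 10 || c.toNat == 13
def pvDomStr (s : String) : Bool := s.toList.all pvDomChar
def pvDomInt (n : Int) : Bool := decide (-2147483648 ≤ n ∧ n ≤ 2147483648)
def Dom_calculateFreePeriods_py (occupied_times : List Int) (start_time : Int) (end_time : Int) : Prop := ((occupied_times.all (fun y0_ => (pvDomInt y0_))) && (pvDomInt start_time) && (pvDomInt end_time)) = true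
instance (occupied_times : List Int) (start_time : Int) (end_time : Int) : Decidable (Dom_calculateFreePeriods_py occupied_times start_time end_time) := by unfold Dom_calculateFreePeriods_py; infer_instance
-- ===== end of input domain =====

-- B replaces A's filter-then-merge over the range by a single pass with an optional
-- open-run start and set membership: a different decomposition of the same task.

-- ===== PORT A =====
-- the dict literal {"start": cs, "end": ce, "duration": ce - cs + 1} (appears twice in A)
def pvMkA (cs ce : Int) : List (String × Int) :=
  [("start", cs), ("end", ce), ("duration", ce - cs + 1)]

-- body of A's merge loop: state = (free_periods, current_start, current_end)
def pvStepA (st : List (List (String × Int)) × Int × Int) (x : Int) :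
    List (List (String × Int)) × Int × Int :=
  if x = st.2.2 + 1 then (st.1, st.2.1, x)
  else (st.1 ++ [pvMkA st.2.1 st.2.2], x, x)

def calculateFreePeriods_py (occupied_times : List Int) (start_time : Int) (end_time : Int) :
    List (List (String × Int)) :=
  let all_periods := PySem.List.pyRange start_time (end_time + 1) 1
  let free_periods_list := all_periods.filter (fun period => !occupied_times.contains period)
  match free_periods_list with
  | [] => []
  | h :: t =>
    let r := t.foldl pvStepA ([], h, h)
    r.1 ++ [pvMkA r.2.1 r.2.2]

-- ===== PORT B =====
-- body of B's loop: state = (free_periods, run_start : Option Int)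
def pvStepB (occupied : PySem.Set Int) (st : List (List (String × Int)) × Option Int)
    (p : Int) : List (List (String × Int)) × Option Int :=
  match st with
  | (fp, some rs) =>
    if occupied.contains p then
      (fp ++ [[("start", rs), ("end", p - 1), ("duration", p - rs)]], none)
    else (fp, some rs)
  | (fp, none) =>
    if occupied.contains p then (fp, none) else (fp, some p)

-- B's trailing "if run_start is not None: append final interval"
def pvFinB (end_time : Int) (st : List (List (String × Int)) × Option Int) :
    List (List (String × Int)) :=
  match st with
  | (fp, some rs) => fp ++ [[("start", rs), ("end", end_time), ("duration", end_time - rs + 1)]]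
  | (fp, none) => fp

def calculateFreePeriods_py_alt (occupied_times : List Int) (start_time : Int) (end_time : Int) :
    List (List (String × Int)) :=
  let occupied := PySem.Set.ofList occupied_times
  pvFinB end_time
    ((PySem.List.pyRange start_time (end_time + 1) 1).foldl (pvStepB occupied) ([], none))

-- ===== PRECONDITION & SPEC =====
def Spec_calculateFreePeriods_py (occupied_times : List Int) (start_time : Int) (end_time : Int) (out : List (List (String × Int))) : Prop := out = calculateFreePeriods_py_alt occupied_times start_time end_time
instance (occupied_times : List Int) (start_time : Int) (end_time : Int) (out : List (List (String × Int))) : Decidable (Spec_calculateFreePeriods_py occupied_times start_time end_time out) := by unfold Spec_calculateFreePeriods_py; infer_instance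

-- ===== CLAIM (what is proved, stated in full; the proofs are below) =====
def Claim_equal_calculateFreePeriods_py : Prop := ∀ (occupied_times : List Int) (start_time : Int) (end_time : Int), Dom_calculateFreePeriods_py occupied_times start_time end_time → Spec_calculateFreePeriods_py occupied_times start_time end_time (calculateFreePeriods_py occupied_times start_time end_time)

-- ===== LEMMAS AND PROOFS =====

-- recursive form of A's merge loop (including the final append)
def pvMerge (cs ce : Int) : List Int → List (List (String × Int))
  | [] => [pvMkA cs ce]
  | x :: xs => if x = ce + 1 then pvMerge cs x xs else pvMkA cs ce :: pvMerge x x xs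

-- A's result on a nonempty free list, as pvMerge
lemma pvFoldA_eq_merge (t : List Int) (fp : List (List (String × Int))) (cs ce : Int) :
    (t.foldl pvStepA (fp, cs, ce)).1 ++ [pvMkA (t.foldl pvStepA (fp, cs, ce)).2.1 (t.foldl pvStepA (fp, cs, ce)).2.2]
      = fp ++ pvMerge cs ce t := by
  induction t generalizing fp cs ce with
  | nil => simp [pvMerge]
  | cons x xs ih =>
    simp only [List.foldl, pvStepA, pvMerge]
    by_cases hx : x = ce + 1
    · simp [hx, ih]
    · simp [hx, ih]

-- the filtered free list, as a function of the left end of the range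
def pvF (occ : List Int) (a e : Int) : List Int :=
  (PySem.List.pyRange a (e + 1) 1).filter (fun p => !occ.contains p)

def pvMatchM (l : List Int) : List (List (String × Int)) :=
  match l with
  | [] => []
  | h :: t => pvMerge h h t

lemma pvF_mem_ge {occ : List Int} {a e x : Int} (hx : x ∈ pvF occ a e) : a ≤ x := by
  have := List.mem_filter.mp hx
  exact (PySem.List.mem_pyRange_one.mp this.1).1

lemma pvSetContains (occ : List Int) (p : Int) :
    (PySem.Set.ofList occ).contains p = occ.contains p := by
  by_cases h : p ∈ occ <;> simp [PySem.Set.contains, PySem.Set.mem_ofList, h]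

-- the joint loop invariant: B's fold from position a equals A's merge of the free list from a
lemma pvKey (occ : List Int) (e : Int) :
    ∀ n a, ((e + 1 - a).toNat = n) →
      (∀ fp, pvFinB e ((PySem.List.pyRange a (e + 1) 1).foldl (pvStepB (PySem.Set.ofList occ)) (fp, none))
           = fp ++ pvMatchM (pvF occ a e)) ∧
      (a ≤ e + 1 → ∀ fp cs, pvFinB e ((PySem.List.pyRange a (e + 1) 1).foldl (pvStepB (PySem.Set.ofList occ)) (fp, some cs))
           = fp ++ pvMerge cs (a - 1) (pvF occ a e)) := by
  intro n
  induction n with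
  | zero =>
    intro a ha
    have hae : e + 1 ≤ a := by omega
    have hnil : PySem.List.pyRange a (e + 1) 1 = [] := PySem.List.pyRange_one_eq_nil hae
    constructor
    · intro fp; simp [hnil, pvF, pvFinB, pvMatchM]
    · intro hle fp cs
      have hce : a - 1 = e := by omega
      simp [hnil, pvF, pvFinB, pvMerge, pvMkA, hce]
  | succ n ih =>
    intro a ha
    have hae : a < e + 1 := by omega
    have hcons := PySem.List.pyRange_one_cons hae
    have ihn := ih (a + 1) (by omega)
    have hF : pvF occ a e = if a ∈ occ then pvF occ (a + 1) e else a :: pvF occ (a + 1) e := by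
      simp only [pvF, hcons, List.filter]
      by_cases h : a ∈ occ <;> simp [h]
    have h11 : a + 1 - 1 = a := by omega
    constructor
    · intro fp
      rw [hcons]
      by_cases h : a ∈ occ
      · simp only [List.foldl, pvStepB, pvSetContains, List.contains_iff_mem, h, if_pos]
        rw [(ihn).1 fp, hF]
        simp [h]
      · simp only [List.foldl, pvStepB, pvSetContains, List.contains_iff_mem, h, if_false]
        rw [(ihn).2 (by omega) fp a, hF, h11]
        simp only [h, if_false]
        rfl
    · intro _ fp cs
      rw [hcons]
      by_cases h : a ∈ occ
      · simp only [List.foldl, pvStepB, pvSetContains, List.contains_iff_mem, h, if_pos]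
        rw [(ihn).1, hF]
        simp only [h, if_pos]
        have hd : [("start", cs), ("end", a - 1), ("duration", a - cs)] = pvMkA cs (a - 1) := by
          simp [pvMkA]; ring
        cases hFc : pvF occ (a + 1) e with
        | nil => simp [pvMerge, pvMatchM, hd]
        | cons h1 t1 =>
          have hge : a + 1 ≤ h1 := pvF_mem_ge (by rw [hFc]; exact List.mem_cons_self)
          have hne : ¬ (h1 = a) := by omega
          simp [pvMerge, pvMatchM, hne, hd]
      · simp only [List.foldl, pvStepB, pvSetContains, List.contains_iff_mem, h, if_false]
        rw [(ihn).2 (by omega) fp cs, hF, h11]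
        simp only [h, if_false]
        have hstep : pvMerge cs (a - 1) (a :: pvF occ (a + 1) e) = pvMerge cs a (pvF occ (a + 1) e) := by
          rw [pvMerge, if_pos (by omega)]
        rw [hstep]

-- ===== VERDICT (by name: the statement is the Claim_ definition above) =====
theorem calculateFreePeriods_py_spec : Claim_equal_calculateFreePeriods_py := by
  intro occ s e _
  unfold Spec_calculateFreePeriods_py calculateFreePeriods_py calculateFreePeriods_py_alt
  have hkey := (pvKey occ e (e + 1 - s).toNat s rfl).1 []
  simp only at hkey
  rw [hkey]
  show (match pvF occ s e with
        | [] => []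
        | h :: t => (t.foldl pvStepA ([], h, h)).1 ++ [pvMkA (t.foldl pvStepA ([], h, h)).2.1 (t.foldl pvStepA ([], h, h)).2.2])
      = [] ++ pvMatchM (pvF occ s e)
  cases pvF occ s e with
  | nil => rfl
  | cons h t => simp [pvMatchM, pvFoldA_eq_merge t [] h h]
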